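-- pv_equiv track=rewrite | github.com/DaMinaup6/algorithm-exercises | is_match.py | sub_s_matched_indexes_for_asterisk_sign_pattern
-- ===== SOURCE A (Python) =====
-- def sub_s_matched_indexes_for_asterisk_sign_pattern(start_index, end_index, sub_s, pattern):
--     matched_indexes_lists = []
--     if pattern[0] == '.':
--         end_index = min(end_index + 1, start_index + len(sub_s))
--         return [list(range(start_index, end_index))]
--     else:
--         matched_indexes_list = []
--         for sub_s_index in range(0, len(sub_s)):
--             if sub_s_index + start_index > end_index:
--                 break
--
--             if sub_s[sub_s_index] == pattern[0]:
--                 matched_indexes_list.append(sub_s_index + start_index)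
--             elif len(matched_indexes_list) > 0:
--                 matched_indexes_lists.append(matched_indexes_list)
--                 matched_indexes_list = []
--
--         if len(matched_indexes_list) > 0:
--             matched_indexes_lists.append(matched_indexes_list)
--
--     return matched_indexes_lists
-- ===== SOURCE B (Python) =====
-- def sub_s_matched_indexes_for_asterisk_sign_pattern(start_index, end_index, sub_s, pattern):
--     if pattern[0] == '.':
--         stop = min(end_index + 1, start_index + len(sub_s))
--         return [list(range(start_index, stop))]
--     matched = [start_index + i for i, c in enumerate(sub_s)
--                if start_index + i <= end_index and c == pattern[0]]
--     groups = []
--     for v in matched: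
--         if groups and groups[-1][-1] == v - 1:
--             groups[-1].append(v)
--         else:
--             groups.append([v])
--     return groups
-- ===== Notes on version B (the rewrite author's own statement) =====
-- stated objective: alternative
-- what changed: A's single stateful loop (current-run accumulator flushed on mismatch, with a break) is replaced by a two-phase decomposition: first collect the flat list of matching positions with a comprehension, then partition it into maximal runs of consecutive integers by a value-adjacency grouping pass; the '.' branch is unchanged.
import Mathlib
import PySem

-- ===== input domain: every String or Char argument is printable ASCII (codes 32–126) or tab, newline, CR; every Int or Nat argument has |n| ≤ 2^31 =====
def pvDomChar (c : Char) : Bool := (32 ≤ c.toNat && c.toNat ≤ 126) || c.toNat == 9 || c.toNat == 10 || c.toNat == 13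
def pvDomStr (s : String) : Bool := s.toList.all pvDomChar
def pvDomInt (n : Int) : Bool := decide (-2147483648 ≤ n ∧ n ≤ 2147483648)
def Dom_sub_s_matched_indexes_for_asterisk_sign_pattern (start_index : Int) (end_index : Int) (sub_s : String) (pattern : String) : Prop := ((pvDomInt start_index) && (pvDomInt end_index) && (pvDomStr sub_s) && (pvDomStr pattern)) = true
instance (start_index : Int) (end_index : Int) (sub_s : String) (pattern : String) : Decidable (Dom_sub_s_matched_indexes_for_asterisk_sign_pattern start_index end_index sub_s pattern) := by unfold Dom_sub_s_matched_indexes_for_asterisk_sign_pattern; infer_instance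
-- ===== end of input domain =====

-- B replaces A's stateful flush-on-mismatch loop by collect-matching-positions then
-- group-consecutive-runs (same O(n) cost; objective: alternative decomposition).

-- ===== PORT A =====
-- the for-loop over range(0, len(sub_s)) with break, transcribed as structural recursion
-- over the character list with an Int index counter and the same (lists, current) state
def pvA_loop (start_index end_index : Int) (p0 : Char) :
    List Char → Int → List (List Int) → List Int → List (List Int)
  | [], _, lists, cur => if cur.length > 0 then lists ++ [cur] else lists
  | c :: rest, i, lists, cur =>
    if i + start_index > end_index then
      -- break, then the post-loop flush
      if cur.length > 0 then lists ++ [cur] else lists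
    else if c == p0 then
      pvA_loop start_index end_index p0 rest (i + 1) lists (cur ++ [i + start_index])
    else if cur.length > 0 then
      pvA_loop start_index end_index p0 rest (i + 1) (lists ++ [cur]) []
    else
      pvA_loop start_index end_index p0 rest (i + 1) lists cur

def sub_s_matched_indexes_for_asterisk_sign_pattern (start_index : Int) (end_index : Int) (sub_s : String) (pattern : String) : List (List Int) :=
  match pattern.toList with
  | [] => []   -- Python raises IndexError on pattern[0]; excluded by Pre_
  | p0 :: _ =>
    if p0 == '.' then
      let end_index' := min (end_index + 1) (start_index + (sub_s.toList.length : Int))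
      [PySem.List.pyRange start_index end_index' 1]
    else
      pvA_loop start_index end_index p0 sub_s.toList 0 [] []

-- ===== PORT B =====
-- one step of the grouping loop: append v to the last group if it continues it, else open a new group
def pvB_runsStep (groups : List (List Int)) (v : Int) : List (List Int) :=
  match groups.getLast? with
  | some g => if g.getLast? = some (v - 1) then groups.dropLast ++ [g ++ [v]] else groups ++ [[v]]
  | none => groups ++ [[v]]

def sub_s_matched_indexes_for_asterisk_sign_pattern_alt (start_index : Int) (end_index : Int) (sub_s : String) (pattern : String) : List (List Int) :=
  match pattern.toList with
  | [] => []   -- Python raises IndexError on pattern[0]; excluded by Pre_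
  | p0 :: _ =>
    if p0 == '.' then
      let stop := min (end_index + 1) (start_index + (sub_s.toList.length : Int))
      [PySem.List.pyRange start_index stop 1]
    else
      let matched := ((PySem.List.enumerate sub_s.toList 0).filter
          (fun p => decide (start_index + p.1 ≤ end_index) && (p.2 == p0))).map
          (fun p => start_index + p.1)
      matched.foldl pvB_runsStep []

-- ===== PRECONDITION & SPEC =====
-- Pre_ excludes exactly the inputs with an empty pattern, on which Python A raises IndexError.
def Pre_sub_s_matched_indexes_for_asterisk_sign_pattern (start_index : Int) (end_index : Int) (sub_s : String) (pattern : String) : Prop := pattern ≠ ""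
instance (start_index : Int) (end_index : Int) (sub_s : String) (pattern : String) : Decidable (Pre_sub_s_matched_indexes_for_asterisk_sign_pattern start_index end_index sub_s pattern) := by unfold Pre_sub_s_matched_indexes_for_asterisk_sign_pattern; infer_instance

def pvWitness_sub_s_matched_indexes_for_asterisk_sign_pattern : Int × Int × String × String := (0, 5, "aaba", "a")

def Spec_sub_s_matched_indexes_for_asterisk_sign_pattern (start_index : Int) (end_index : Int) (sub_s : String) (pattern : String) (out : List (List Int)) : Prop := out = sub_s_matched_indexes_for_asterisk_sign_pattern_alt start_index end_index sub_s pattern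
instance (start_index : Int) (end_index : Int) (sub_s : String) (pattern : String) (out : List (List Int)) : Decidable (Spec_sub_s_matched_indexes_for_asterisk_sign_pattern start_index end_index sub_s pattern out) := by unfold Spec_sub_s_matched_indexes_for_asterisk_sign_pattern; infer_instance

-- ===== CLAIM (what is proved, stated in full; the proofs are below) =====
def Claim_equal_sub_s_matched_indexes_for_asterisk_sign_pattern : Prop := ∀ (start_index : Int) (end_index : Int) (sub_s : String) (pattern : String), Dom_sub_s_matched_indexes_for_asterisk_sign_pattern start_index end_index sub_s pattern → Pre_sub_s_matched_indexes_for_asterisk_sign_pattern start_index end_index sub_s pattern → Spec_sub_s_matched_indexes_for_asterisk_sign_pattern start_index end_index sub_s pattern (sub_s_matched_indexes_for_asterisk_sign_pattern start_index end_index sub_s pattern)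

-- ===== LEMMAS AND PROOFS =====

-- the flat list of matching positions (filter semantics), the common reference point
def pvMf (st en : Int) (p0 : Char) : List Char → Int → List Int
  | [], _ => []
  | c :: rest, i =>
    if i + st ≤ en ∧ c == p0 then (i + st) :: pvMf st en p0 rest (i + 1)
    else pvMf st en p0 rest (i + 1)

-- grouping of a strictly increasing list into maximal consecutive runs, recursion form
def pvGo : List Int → List Int → Int → List (List Int)
  | [], cur, _ => [cur]
  | v :: vs, cur, last => if v = last + 1 then pvGo vs (cur ++ [v]) v else cur :: pvGo vs [v] v

def pvGroupAll : List Int → List (List Int)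
  | [] => []
  | v :: vs => pvGo vs [v] v

theorem pvMf_dead (st en : Int) (p0 : Char) :
    ∀ (cs : List Char) (i : Int), en < i + st → pvMf st en p0 cs i = [] := by
  intro cs
  induction cs with
  | nil => intro i _; rfl
  | cons c rest ih =>
    intro i h
    have h' : en < (i + 1) + st := by omega
    simp [pvMf, ih (i + 1) h']
    omega

theorem pvMf_bound (st en : Int) (p0 : Char) :
    ∀ (cs : List Char) (i : Int) (x : Int), x ∈ pvMf st en p0 cs i → i + st ≤ x := by
  intro cs
  induction cs with
  | nil => intro i x hx; simp [pvMf] at hx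
  | cons c rest ih =>
    intro i x hx
    simp only [pvMf] at hx
    split at hx
    · rcases List.mem_cons.1 hx with h | h
      · omega
      · have := ih (i + 1) x h; omega
    · have := ih (i + 1) x hx; omega

theorem pvFoldl_runsStep (vs : List Int) :
    ∀ (gs : List (List Int)) (cur : List Int) (last : Int), cur.getLast? = some last →
      List.foldl pvB_runsStep (gs ++ [cur]) vs = gs ++ pvGo vs cur last := by
  induction vs with
  | nil => intro gs cur last _; simp [pvGo]
  | cons v vs ih =>
    intro gs cur last hlast
    by_cases hv : v = last + 1
    · have hcond : cur.getLast? = some (v - 1) := by rw [hlast]; congr 1; omega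
      have hstep : pvB_runsStep (gs ++ [cur]) v = gs ++ [cur ++ [v]] := by
        simp [pvB_runsStep, hcond]
      have hlast' : (cur ++ [v]).getLast? = some v := List.getLast?_concat
      rw [List.foldl_cons, hstep, ih gs (cur ++ [v]) v hlast']
      simp [pvGo, hv]
    · have hcond : ¬ cur.getLast? = some (v - 1) := by
        rw [hlast]; intro h; exact hv (by have := Option.some.inj h; omega)
      have hstep : pvB_runsStep (gs ++ [cur]) v = (gs ++ [cur]) ++ [[v]] := by
        simp [pvB_runsStep, hcond]
      have hrec : List.foldl pvB_runsStep ((gs ++ [cur]) ++ [[v]]) vs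
          = (gs ++ [cur]) ++ pvGo vs [v] v := ih (gs ++ [cur]) [v] v rfl
      rw [List.foldl_cons, hstep, hrec]
      simp [pvGo, hv]

theorem pvFoldl_runs (vs : List Int) :
    List.foldl pvB_runsStep [] vs = pvGroupAll vs := by
  cases vs with
  | nil => rfl
  | cons v vs =>
    have hstep : pvB_runsStep [] v = [[v]] := by simp [pvB_runsStep]
    have := pvFoldl_runsStep vs [] [v] v rfl
    simpa [pvGroupAll, hstep] using this

theorem pvMain (st en : Int) (p0 : Char) :
    ∀ (cs : List Char) (i : Int),
      (∀ lists, pvA_loop st en p0 cs i lists [] = lists ++ pvGroupAll (pvMf st en p0 cs i)) ∧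
      (∀ lists cur, cur ≠ [] →
        pvA_loop st en p0 cs i lists cur = lists ++ pvGo (pvMf st en p0 cs i) cur (i + st - 1)) := by
  intro cs
  induction cs with
  | nil =>
    intro i
    constructor
    · intro lists; simp [pvA_loop, pvMf, pvGroupAll]
    · intro lists cur hcur
      have : cur.length > 0 := List.length_pos_iff.2 hcur
      simp [pvA_loop, pvMf, pvGo, this]
  | cons c rest ih =>
    intro i
    by_cases hbr : i + st > en
    · have hmf : pvMf st en p0 (c :: rest) i = [] := pvMf_dead st en p0 _ i (by omega)
      constructor
      · intro lists; simp [pvA_loop, hbr, hmf, pvGroupAll]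
      · intro lists cur hcur
        have : cur.length > 0 := List.length_pos_iff.2 hcur
        simp [pvA_loop, hbr, hmf, pvGo, this]
    · by_cases hc : c = p0
      · have hmf : pvMf st en p0 (c :: rest) i = (i + st) :: pvMf st en p0 rest (i + 1) := by
          simp [pvMf, hc]; omega
        have hcb : (c == p0) = true := by simp [hc]
        constructor
        · intro lists
          have h2 := (ih (i + 1)).2 lists [i + st] (by simp)
          have he : (i + 1) + st - 1 = i + st := by omega
          have hstep : pvA_loop st en p0 (c :: rest) i lists []
              = pvA_loop st en p0 rest (i + 1) lists [i + st] := by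
            simp [pvA_loop, hbr, hcb]
          rw [hstep, h2, he, hmf]
          rfl
        · intro lists cur hcur
          have h2 := (ih (i + 1)).2 lists (cur ++ [i + st]) (by simp)
          have he : (i + 1) + st - 1 = i + st := by omega
          have hstep : pvA_loop st en p0 (c :: rest) i lists cur
              = pvA_loop st en p0 rest (i + 1) lists (cur ++ [i + st]) := by
            simp [pvA_loop, hbr, hcb]
          rw [hstep, h2, he, hmf]
          have hgo : pvGo ((i + st) :: pvMf st en p0 rest (i + 1)) cur (i + st - 1)
              = pvGo (pvMf st en p0 rest (i + 1)) (cur ++ [i + st]) (i + st) := by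
            simp only [pvGo]; rw [if_pos (by omega)]
          rw [hgo]
      · have hmf : pvMf st en p0 (c :: rest) i = pvMf st en p0 rest (i + 1) := by
          simp [pvMf, hc]
        have hcb : (c == p0) = false := by simp [hc]
        constructor
        · intro lists
          simpa [pvA_loop, hbr, hcb, hmf] using (ih (i + 1)).1 lists
        · intro lists cur hcur
          have hlen : cur.length > 0 := List.length_pos_iff.2 hcur
          have h1 := (ih (i + 1)).1 (lists ++ [cur])
          have hstep : pvA_loop st en p0 (c :: rest) i lists cur
              = pvA_loop st en p0 rest (i + 1) (lists ++ [cur]) [] := by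
            simp [pvA_loop, hbr, hcb, hlen]
          rw [hstep, h1, hmf, List.append_assoc]
          congr 1
          cases hms : pvMf st en p0 rest (i + 1) with
          | nil => simp [pvGroupAll, pvGo]
          | cons m ms =>
            have hm : (i + 1) + st ≤ m := pvMf_bound st en p0 rest (i + 1) m (by rw [hms]; exact List.mem_cons_self)
            have hgo : pvGo (m :: ms) cur (i + st - 1) = cur :: pvGo ms [m] m := by
              simp only [pvGo]; rw [if_neg (by omega)]
            simp [pvGroupAll, hgo]

theorem pvBridge (st en : Int) (p0 : Char) :
    ∀ (cs : List Char) (i : Int),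
      ((PySem.List.enumerate cs i).filter
          (fun p => decide (st + p.1 ≤ en) && (p.2 == p0))).map (fun p => st + p.1)
        = pvMf st en p0 cs i := by
  intro cs
  induction cs with
  | nil => intro i; simp [PySem.List.enumerate_nil, pvMf]
  | cons c rest ih =>
    intro i
    rw [PySem.List.enumerate_cons]
    by_cases h1 : st + i ≤ en
    · by_cases h2 : c == p0
      · simp [pvMf, List.filter_cons, h1, h2, ih (i + 1), (by omega : i + st ≤ en), Int.add_comm st i]
      · simp [pvMf, List.filter_cons, h1, h2, ih (i + 1)]
    · have h1' : ¬ i + st ≤ en := by omega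
      simp [pvMf, List.filter_cons, h1, h1', ih (i + 1)]

-- ===== VERDICT (by name: the statement is the Claim_ definition above) =====
theorem sub_s_matched_indexes_for_asterisk_sign_pattern_spec : Claim_equal_sub_s_matched_indexes_for_asterisk_sign_pattern := by
  intro start_index end_index sub_s pattern _ hpre
  unfold Spec_sub_s_matched_indexes_for_asterisk_sign_pattern
  unfold sub_s_matched_indexes_for_asterisk_sign_pattern sub_s_matched_indexes_for_asterisk_sign_pattern_alt
  cases hp : pattern.toList with
  | nil => exact absurd (String.toList_eq_nil_iff.mp hp) hpre
  | cons p0 ps =>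
    by_cases hdot : p0 == '.'
    · simp [hdot]
    · simp only [if_neg hdot]
      rw [pvBridge start_index end_index p0 sub_s.toList 0, pvFoldl_runs,
        (pvMain start_index end_index p0 sub_s.toList 0).1 [], List.nil_append]
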